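-- pv_equiv track=rewrite | github.com/jeageon/RBS_cal | plasmid_designer/plasmid_primer_scoring.py | _window_positions
-- ===== SOURCE A (Python) =====
-- from typing import Any, List, Optional, Set
--
-- def _window_positions(start: int, end: int, length: int) -> Set[int]:
--     if length <= 0:
--         return set()
--
--     raw_span = end - start
--     start %= length
--     end %= length
--     if start < 0:
--         start += length
--     if end < 0:
--         end += length
--
--     if raw_span != 0 and (raw_span % length == 0):
--         return {i for i in range(length)}
--
--     if start == end:
--         return set()
--
--     if start < end:
--         return {i for i in range(start, end)}
--     return {i for i in range(start, length)} | {i for i in range(0, end)}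
-- ===== SOURCE B (Python) =====
-- def _window_positions(start: int, end: int, length: int):
--     if length <= 0:
--         return set()
--     raw_span = end - start
--     if raw_span != 0 and raw_span % length == 0:
--         return set(range(length))
--     s = start % length
--     n = raw_span % length
--     return {(s + i) % length for i in range(n)}
-- ===== Notes on version B (the rewrite author's own statement) =====
-- stated objective: simpler
-- what changed: Replaces A's normalization of both endpoints plus three-way branch (forward range / empty / union of two contiguous ranges) with a single modular walk: n = (end-start) % length positions generated as (start+i) % length, keeping only the length<=0 guard and the full-wrap branch.
import Mathlib
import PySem

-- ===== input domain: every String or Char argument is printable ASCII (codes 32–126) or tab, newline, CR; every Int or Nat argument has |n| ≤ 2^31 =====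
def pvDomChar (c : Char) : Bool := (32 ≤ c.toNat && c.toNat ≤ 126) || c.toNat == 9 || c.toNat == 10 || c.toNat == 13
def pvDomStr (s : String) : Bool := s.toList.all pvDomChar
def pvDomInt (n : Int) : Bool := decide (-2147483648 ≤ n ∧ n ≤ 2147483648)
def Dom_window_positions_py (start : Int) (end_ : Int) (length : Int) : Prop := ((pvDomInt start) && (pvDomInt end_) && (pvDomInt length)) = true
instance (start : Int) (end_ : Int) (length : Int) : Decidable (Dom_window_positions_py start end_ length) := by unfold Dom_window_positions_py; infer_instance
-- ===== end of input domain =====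

-- B replaces A's three-way branch (forward range / empty / union of two ranges) by one
-- modular walk {(start+i) % length for i in range((end-start) % length)}; objective: simpler.

-- ===== PORT A =====
def window_positions_py (start : Int) (end_ : Int) (length : Int) : List Int :=
  if length ≤ 0 then PySem.Set.empty else
  let raw_span := end_ - start
  let start1 := PySem.Int.mod start length
  let end1 := PySem.Int.mod end_ length
  let start2 := if start1 < 0 then start1 + length else start1
  let end2 := if end1 < 0 then end1 + length else end1
  if raw_span ≠ 0 ∧ PySem.Int.mod raw_span length = 0 then
    PySem.Set.ofList (PySem.List.pyRange 0 length 1)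
  else if start2 = end2 then PySem.Set.empty
  else if start2 < end2 then
    PySem.Set.ofList (PySem.List.pyRange start2 end2 1)
  else
    PySem.Set.union (PySem.Set.ofList (PySem.List.pyRange start2 length 1))
                    (PySem.Set.ofList (PySem.List.pyRange 0 end2 1))

-- ===== PORT B =====
def window_positions_py_alt (start : Int) (end_ : Int) (length : Int) : List Int :=
  if length ≤ 0 then PySem.Set.empty else
  let raw_span := end_ - start
  if raw_span ≠ 0 ∧ PySem.Int.mod raw_span length = 0 then
    PySem.Set.ofList (PySem.List.pyRange 0 length 1)
  else
    let s := PySem.Int.mod start length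
    let n := PySem.Int.mod raw_span length
    PySem.Set.ofList ((PySem.List.pyRange 0 n 1).map (fun i => PySem.Int.mod (s + i) length))

-- ===== PRECONDITION & SPEC =====
def Spec_window_positions_py (start : Int) (end_ : Int) (length : Int) (out : List Int) : Prop := out = window_positions_py_alt start end_ length
instance (start : Int) (end_ : Int) (length : Int) (out : List Int) : Decidable (Spec_window_positions_py start end_ length out) := by unfold Spec_window_positions_py; infer_instance

-- ===== CLAIM (what is proved, stated in full; the proofs are below) =====
def Claim_equal_window_positions_py : Prop := ∀ (start : Int) (end_ : Int) (length : Int), Dom_window_positions_py start end_ length → Spec_window_positions_py start end_ length (window_positions_py start end_ length)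

-- ===== LEMMAS AND PROOFS =====

-- set-union of two disjoint duplicate-free lists is their concatenation
theorem pv_union_append {t s : List Int} (ht : t.Nodup) (hd : ∀ x ∈ t, x ∉ s) :
    PySem.Set.union s t = s ++ t := by
  induction t generalizing s with
  | nil => simp [PySem.Set.union, PySem.Set.update]
  | cons x xs ih =>
    have hx : x ∉ s := hd x (by simp)
    have h1 : PySem.Set.union s (x :: xs) = PySem.Set.update (PySem.Set.add s x) xs := by
      simp [PySem.Set.union, PySem.Set.update_cons]
    rw [h1, PySem.Set.add_of_not_mem hx]
    have : PySem.Set.update (s ++ [x]) xs = PySem.Set.union (s ++ [x]) xs := rfl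
    rw [this, ih ht.of_cons]
    · simp
    · intro y hy
      simp only [List.mem_append, List.mem_singleton]
      rintro (h | rfl)
      · exact hd y (by simp [hy]) h
      · exact (List.nodup_cons.mp ht).1 hy

-- ===== VERDICT (by name: the statement is the Claim_ definition above) =====
theorem window_positions_py_spec : Claim_equal_window_positions_py := by
  intro start end_ length _
  unfold Spec_window_positions_py window_positions_py window_positions_py_alt
  by_cases hL : length ≤ 0
  · simp [hL]
  · simp only [if_neg hL]
    have hLpos : (0:Int) < length := by omega
    set L := length with hLdef
    have hmod : ∀ a : Int, PySem.Int.mod a L = a % L := fun a => PySem.Int.mod_eq_emod_of_pos hLpos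
    by_cases hw : end_ - start ≠ 0 ∧ PySem.Int.mod (end_ - start) L = 0
    · simp only [if_pos hw]
    · simp only [if_neg hw]
      set s := PySem.Int.mod start L with hs
      set e := PySem.Int.mod end_ L with he
      have hs0 : 0 ≤ s := PySem.Int.mod_nonneg start hLpos
      have hsL : s < L := PySem.Int.mod_lt start hLpos
      have he0 : 0 ≤ e := PySem.Int.mod_nonneg end_ hLpos
      have heL : e < L := PySem.Int.mod_lt end_ hLpos
      rw [if_neg (by omega : ¬ s < 0), if_neg (by omega : ¬ e < 0)]
      have hespan : PySem.Int.mod (end_ - start) L = (e - s) % L := by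
        rw [hmod, hs, he, hmod, hmod, Int.sub_emod]
      by_cases hse : s = e
      · rw [if_pos hse, hespan, hse]
        simp [PySem.Set.empty]
      · rw [if_neg hse]
        by_cases hlt : s < e
        · -- forward window: one contiguous range
          rw [if_pos hlt]
          have hn : PySem.Int.mod (end_ - start) L = e - s := by
            rw [hespan]; exact Int.emod_eq_of_lt (by omega) (by omega)
          rw [hn]
          have hmapeq : (PySem.List.pyRange 0 (e - s) 1).map (fun i => PySem.Int.mod (s + i) L)
              = PySem.List.pyRange s e 1 := by
            rw [PySem.List.pyRange_one, PySem.List.pyRange_one, List.map_map]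
            simp only [Int.sub_zero]
            refine List.map_congr_left ?_
            intro k hk
            simp only [List.mem_range] at hk
            have hk' : (k : Int) < e - s := by omega
            simp only [Function.comp]
            rw [hmod, (by ring : s + (0 + (k : Int)) = s + k),
                Int.emod_eq_of_lt (by omega) (by omega)]
          rw [hmapeq]
        · -- wrapped window: tail of the circle then its head
          rw [if_neg hlt]
          have hes : e < s := by omega
          have hn : PySem.Int.mod (end_ - start) L = e - s + L := by
            rw [hespan, (Int.add_emod_right (e - s) L).symm]
            exact Int.emod_eq_of_lt (by omega) (by omega)
          rw [hn]
          have hmapeq : (PySem.List.pyRange 0 (e - s + L) 1).map (fun i => PySem.Int.mod (s + i) L)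
              = PySem.List.pyRange s L 1 ++ PySem.List.pyRange 0 e 1 := by
            rw [PySem.List.pyRange_one, List.map_map]
            simp only [Int.sub_zero]
            have hsplit : (e - s + L).toNat = (L - s).toNat + e.toNat := by omega
            rw [hsplit, List.range_add, List.map_append, List.map_map]
            congr 1
            · rw [PySem.List.pyRange_one]
              refine List.map_congr_left ?_
              intro k hk
              simp only [List.mem_range] at hk
              simp only [Function.comp]
              rw [hmod, (by ring : s + (0 + (k : Int)) = s + k),
                  Int.emod_eq_of_lt (by omega) (by omega)]
            · rw [PySem.List.pyRange_one]
              simp only [Int.sub_zero]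
              refine List.map_congr_left ?_
              intro k hk
              simp only [List.mem_range] at hk
              simp only [Function.comp]
              rw [hmod,
                  (by push_cast; omega : s + (0 + (((L - s).toNat + k : Nat) : Int)) = (k : Int) + L),
                  Int.add_emod_right, Int.emod_eq_of_lt (by omega) (by omega)]
              omega
          have nd1 := PySem.List.nodup_pyRange_one s L
          have nd2 := PySem.List.nodup_pyRange_one 0 e
          have hdisj : ∀ x ∈ PySem.List.pyRange 0 e 1, x ∉ PySem.List.pyRange s L 1 := by
            intro x hx hx'
            rw [PySem.List.mem_pyRange_one] at hx hx'
            omega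
          rw [hmapeq,
              PySem.Set.ofList_eq_self_of_nodup _ (nd1.append nd2 (fun x hx hx' => hdisj x hx' hx)),
              PySem.Set.ofList_eq_self_of_nodup _ nd1, PySem.Set.ofList_eq_self_of_nodup _ nd2,
              pv_union_append nd2 hdisj]
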